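-- pv_equiv track=rewrite | github.com/Aasthaengg/IBMdataset | Python_codes/p03488/s228064546.py | check
-- ===== SOURCE A (Python) =====
-- def check(z, zz, z_list):
--   if len(z_list) == 0:
--     if z != zz:
--       return 0
--     else:
--       return 1
--   else:
--     z_n = len(z_list)
--     z_hash = {}
--     z_hash[0] = {}
--     z_hash[0][zz] = 1
--     z_hash[z_n] = {}
--     z_hash[z_n][z] = 1
--     for i in range(0,z_n):
--       if i+1 not in z_hash:
--         z_hash[i+1] = {}
--         for b_z in z_hash[i]:
--           a_z = b_z + z_list[i]
--           z_hash[i+1][a_z] = 1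
--           a_z = b_z - z_list[i]
--           z_hash[i+1][a_z] = 1
--       else:
--         for b_z in z_hash[i]:
--           a_z = b_z + z_list[i]
--           if a_z in z_hash[i+1]:
--             return 1
--           a_z = b_z - z_list[i]
--           if a_z in z_hash[i+1]:
--             return 1
--         return 0
--       if z_n-i-1 not in z_hash:
--         z_hash[z_n-i-1] = {}
--         for a_z in z_hash[z_n-i]:
--           b_z = a_z + z_list[z_n-i-1]
--           z_hash[z_n-i-1][b_z] = 1
--           b_z = a_z - z_list[z_n-i-1]
--           z_hash[z_n-i-1][b_z] = 1
--       else: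
--         for a_z in z_hash[z_n-i]:
--           b_z = a_z + z_list[z_n-i-1]
--           if b_z in z_hash[z_n-i-1]:
--             return 1
--           b_z = a_z - z_list[z_n-i-1]
--           if b_z in z_hash[z_n-i-1]:
--             return 1
--         return 0
-- ===== SOURCE B (Python) =====
-- def check(z, zz, z_list):
--     reachable = {zz}
--     for x in z_list:
--         reachable = {v + x for v in reachable} | {v - x for v in reachable}
--     return 1 if z in reachable else 0
-- ===== Notes on version B (the rewrite author's own statement) =====
-- stated objective: simpler
-- what changed: Replaces the bidirectional meet-in-the-middle search (level dicts grown alternately from both ends with early-exit membership scans) by a single forward pass that keeps one set of reachable values and tests z at the end; the empty-list special case disappears.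
import Mathlib
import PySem

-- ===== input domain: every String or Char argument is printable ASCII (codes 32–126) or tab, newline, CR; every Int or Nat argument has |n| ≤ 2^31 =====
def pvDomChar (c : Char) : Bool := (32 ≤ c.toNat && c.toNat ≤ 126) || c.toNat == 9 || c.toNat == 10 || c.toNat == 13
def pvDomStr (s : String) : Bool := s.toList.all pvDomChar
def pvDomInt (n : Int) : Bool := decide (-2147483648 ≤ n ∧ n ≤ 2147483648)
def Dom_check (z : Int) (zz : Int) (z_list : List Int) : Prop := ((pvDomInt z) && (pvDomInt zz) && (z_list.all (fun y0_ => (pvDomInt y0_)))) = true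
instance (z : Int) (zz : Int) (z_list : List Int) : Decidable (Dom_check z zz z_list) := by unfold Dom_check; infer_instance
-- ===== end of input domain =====

-- B replaces A's bidirectional meet-in-the-middle level-dict search by a single forward
-- reachable-set pass (objective: simpler); equal return value on every input.


-- ===== PORT A =====
-- the 'build' inner loop: expand level dict lvl by ±x into the fresh dict z_hash[level]
def pvBuildLevel (lvl : PySem.Dict Int Int) (x : Int) : PySem.Dict Int Int :=
  lvl.keys.foldl (fun d b => (d.insert (b + x) 1).insert (b - x) 1) PySem.Dict.empty

-- the 'check' inner loop: scan lvl's keys; return 1 at the first b with b+x or b-x in tgt, else 0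
def pvCheckLevel (lvl : PySem.Dict Int Int) (tgt : PySem.Dict Int Int) (x : Int) : Int :=
  if lvl.keys.any (fun b => tgt.contains (b + x) || tgt.contains (b - x)) then 1 else 0

-- the main 'for i in range(0, z_n)' loop; fuel = z_n - i iterations remain.
-- Fuel 0 is the loop falling off the end: unreachable for z_n ≥ 1 (the frontiers always
-- meet by iteration ⌈z_n/2⌉ - 1 and return inside the loop; Python would return None there).
def pvCheckLoop (xs : List Int) (n : Nat) : Nat → Nat → PySem.Dict Int (PySem.Dict Int Int) → Int
  | _, 0, _ => 0
  | i, fuel + 1, h =>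
    let x := PySem.List.pyGetD xs (i : Int) 0        -- z_list[i], always in range here
    match h.get? ((i : Int) + 1) with
    | none =>
      let h1 := h.insert ((i : Int) + 1) (pvBuildLevel (h.getD (i : Int) PySem.Dict.empty) x)
      let x' := PySem.List.pyGetD xs ((n : Int) - (i : Int) - 1) 0   -- z_list[z_n-i-1]
      match h1.get? ((n : Int) - (i : Int) - 1) with
      | none =>
        pvCheckLoop xs n (i + 1) fuel
          (h1.insert ((n : Int) - (i : Int) - 1)
            (pvBuildLevel (h1.getD ((n : Int) - (i : Int)) PySem.Dict.empty) x'))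
      | some d => pvCheckLevel (h1.getD ((n : Int) - (i : Int)) PySem.Dict.empty) d x'
    | some d => pvCheckLevel (h.getD (i : Int) PySem.Dict.empty) d x

def check (z : Int) (zz : Int) (z_list : List Int) : Int :=
  if z_list.length == 0 then
    if z ≠ zz then 0 else 1
  else
    let n := z_list.length
    let h0 : PySem.Dict Int (PySem.Dict Int Int) :=
      ((PySem.Dict.empty.insert (0 : Int) (PySem.Dict.empty.insert zz (1 : Int))).insert
        ((n : Nat) : Int) (PySem.Dict.empty.insert z (1 : Int)))
    pvCheckLoop z_list n 0 n h0

-- ===== PORT B =====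
def check_alt (z : Int) (zz : Int) (z_list : List Int) : Int :=
  let reachable : PySem.Set Int :=
    z_list.foldl
      (fun s x => PySem.Set.union (PySem.Set.ofList (s.map (fun v => v + x)))
                                  (PySem.Set.ofList (s.map (fun v => v - x))))
      (PySem.Set.ofList [zz])
  if PySem.Set.contains reachable z then 1 else 0

-- ===== PRECONDITION & SPEC =====
def Spec_check (z : Int) (zz : Int) (z_list : List Int) (out : Int) : Prop := out = check_alt z zz z_list
instance (z : Int) (zz : Int) (z_list : List Int) (out : Int) : Decidable (Spec_check z zz z_list out) := by unfold Spec_check; infer_instance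

-- ===== CLAIM (what is proved, stated in full; the proofs are below) =====
def Claim_equal_check : Prop := ∀ (z : Int) (zz : Int) (z_list : List Int), Dom_check z zz z_list → Spec_check z zz z_list (check z zz z_list)

-- ===== LEMMAS AND PROOFS =====

-- b is reachable from a by adding or subtracting each element of the list in turn
def pvReachB : List Int → Int → Int → Bool
  | [], a, b => a == b
  | x :: xs, a, b => pvReachB xs (a + x) b || pvReachB xs (a - x) b

theorem pvReachB_append (ys ws : List Int) (a c : Int) :
    pvReachB (ys ++ ws) a c = true ↔ ∃ b, pvReachB ys a b = true ∧ pvReachB ws b c = true := by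
  induction ys generalizing a with
  | nil => simp [pvReachB]
  | cons y ys ih =>
    simp only [List.cons_append, pvReachB, Bool.or_eq_true, ih, or_and_right, exists_or]

theorem pvReachB_snoc (ys : List Int) (x a k : Int) :
    pvReachB (ys ++ [x]) a k = true ↔
      ∃ b, pvReachB ys a b = true ∧ (k = b + x ∨ k = b - x) := by
  rw [pvReachB_append]
  refine exists_congr fun b => and_congr_right fun _ => ?_
  simp only [pvReachB, Bool.or_eq_true, beq_iff_eq]
  constructor
  · rintro (h | h) <;> [exact Or.inl h.symm; exact Or.inr h.symm]
  · rintro (h | h) <;> [exact Or.inl h.symm; exact Or.inr h.symm]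

theorem pvReachB_reverse (ys : List Int) (a b : Int) :
    pvReachB ys.reverse b a = true ↔ pvReachB ys a b = true := by
  induction ys generalizing a b with
  | nil =>
    simp only [List.reverse_nil, pvReachB, beq_iff_eq]
    exact eq_comm
  | cons y ys ih =>
    rw [List.reverse_cons, pvReachB_snoc]
    simp only [pvReachB, Bool.or_eq_true]
    constructor
    · rintro ⟨m, hm, rfl | rfl⟩
      · refine Or.inr ?_
        rw [ih] at hm
        simpa using hm
      · refine Or.inl ?_
        rw [ih] at hm
        simpa using hm
    · rintro (h | h)
      · exact ⟨a + y, (ih _ _).2 h, Or.inr (by ring)⟩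
      · exact ⟨a - y, (ih _ _).2 h, Or.inl (by ring)⟩

-- the meet-in-the-middle identity: a forward level and a backward level intersect
-- exactly when z is reachable from zz over the whole list
theorem pvMeet (xs : List Int) (zz z : Int) (m : Nat) :
    (∃ k, pvReachB (xs.take m) zz k = true ∧ pvReachB ((xs.drop m).reverse) z k = true) ↔
      pvReachB xs zz z = true := by
  conv_rhs => rw [← List.take_append_drop m xs]
  rw [pvReachB_append]
  exact exists_congr fun k => and_congr_right fun _ => pvReachB_reverse _ _ _

-- one ± step through a predicate characterised set
theorem pvStep_iff (P Q F' : Int → Prop) (x : Int)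
    (hF : ∀ k, F' k ↔ ∃ b, P b ∧ (k = b + x ∨ k = b - x)) :
    (∃ b, P b ∧ (Q (b + x) ∨ Q (b - x))) ↔ (∃ k, F' k ∧ Q k) := by
  constructor
  · rintro ⟨b, hb, hq | hq⟩
    · exact ⟨b + x, (hF _).2 ⟨b, hb, Or.inl rfl⟩, hq⟩
    · exact ⟨b - x, (hF _).2 ⟨b, hb, Or.inr rfl⟩, hq⟩
  · rintro ⟨k, hk, hq⟩
    rcases (hF k).1 hk with ⟨b, hb, rfl | rfl⟩
    · exact ⟨b, hb, Or.inl hq⟩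
    · exact ⟨b, hb, Or.inr hq⟩

theorem pvBuildLevel_contains (lvl : PySem.Dict Int Int) (x k : Int) :
    (pvBuildLevel lvl x).contains k = true ↔
      ∃ b, lvl.contains b = true ∧ (k = b + x ∨ k = b - x) := by
  unfold pvBuildLevel
  have aux : ∀ (l : List Int) (d0 : PySem.Dict Int Int),
      (l.foldl (fun d b => (d.insert (b + x) 1).insert (b - x) 1) d0).contains k = true ↔
        d0.contains k = true ∨ ∃ b ∈ l, k = b + x ∨ k = b - x := by
    intro l
    induction l with
    | nil => simp
    | cons b l ih =>
      intro d0
      simp only [List.foldl_cons, ih, PySem.Dict.contains_insert, Bool.or_eq_true,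
        beq_iff_eq, List.mem_cons]
      constructor
      · rintro ((h | h | h) | ⟨c, hc, h⟩)
        · exact Or.inr ⟨b, Or.inl rfl, Or.inr h⟩
        · exact Or.inr ⟨b, Or.inl rfl, Or.inl h⟩
        · exact Or.inl h
        · exact Or.inr ⟨c, Or.inr hc, h⟩
      · rintro (h | ⟨c, rfl | hc, h⟩)
        · exact Or.inl (Or.inr (Or.inr h))
        · rcases h with h | h
          · exact Or.inl (Or.inr (Or.inl h))
          · exact Or.inl (Or.inl h)
        · exact Or.inr ⟨c, hc, h⟩
  rw [aux]
  simp only [PySem.Dict.contains_empty, Bool.false_eq_true, false_or]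
  exact exists_congr fun b => and_congr_left fun _ =>
    (PySem.Dict.contains_iff_mem_keys lvl b).symm

theorem pvCheckLevel_eq (lvl tgt : PySem.Dict Int Int) (x : Int) (c : Bool)
    (h : (∃ b, lvl.contains b = true ∧
            (tgt.contains (b + x) = true ∨ tgt.contains (b - x) = true)) ↔ c = true) :
    pvCheckLevel lvl tgt x = if c then 1 else 0 := by
  unfold pvCheckLevel
  have : (lvl.keys.any fun b => tgt.contains (b + x) || tgt.contains (b - x)) = c := by
    rw [Bool.eq_iff_iff, List.any_eq_true, ← h]
    constructor
    · rintro ⟨b, hb, hb2⟩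
      exact ⟨b, (PySem.Dict.contains_iff_mem_keys lvl b).2 hb,
        by simpa [Bool.or_eq_true] using hb2⟩
    · rintro ⟨b, hb, hb2⟩
      exact ⟨b, (PySem.Dict.contains_iff_mem_keys lvl b).1 hb,
        by simpa [Bool.or_eq_true] using hb2⟩
  rw [this]

-- B-side: membership in the folded frontier is reachability from some seed
theorem pvAltMem (xs : List Int) : ∀ (s : PySem.Set Int) (w : Int),
    (w ∈ xs.foldl
      (fun s x => PySem.Set.union (PySem.Set.ofList (s.map (fun v => v + x)))
                                  (PySem.Set.ofList (s.map (fun v => v - x)))) s) ↔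
      ∃ v ∈ s, pvReachB xs v w = true := by
  induction xs with
  | nil =>
    intro s w
    simp only [List.foldl_nil, pvReachB, beq_iff_eq]
    exact ⟨fun h => ⟨w, h, rfl⟩, fun ⟨v, hv, e⟩ => e ▸ hv⟩
  | cons x xs ih =>
    intro s w
    rw [List.foldl_cons, ih]
    constructor
    · rintro ⟨v, hv, hr⟩
      rw [PySem.Set.mem_union, PySem.Set.mem_ofList, PySem.Set.mem_ofList] at hv
      rcases hv with hv | hv <;> rcases List.mem_map.1 hv with ⟨u, hu, rfl⟩
      · exact ⟨u, hu, by simp [pvReachB, hr]⟩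
      · exact ⟨u, hu, by simp [pvReachB, hr]⟩
    · rintro ⟨u, hu, hr⟩
      simp only [pvReachB, Bool.or_eq_true] at hr
      rcases hr with hr | hr
      · refine ⟨u + x, ?_, hr⟩
        rw [PySem.Set.mem_union, PySem.Set.mem_ofList]
        exact Or.inl (List.mem_map.2 ⟨u, hu, rfl⟩)
      · refine ⟨u - x, ?_, hr⟩
        rw [PySem.Set.mem_union, PySem.Set.mem_ofList, PySem.Set.mem_ofList]
        exact Or.inr (List.mem_map.2 ⟨u, hu, rfl⟩)

theorem check_alt_eq (z zz : Int) (xs : List Int) :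
    check_alt z zz xs = if pvReachB xs zz z then 1 else 0 := by
  unfold check_alt
  have : PySem.Set.contains
      (xs.foldl
        (fun s x => PySem.Set.union (PySem.Set.ofList (s.map (fun v => v + x)))
                                    (PySem.Set.ofList (s.map (fun v => v - x))))
        (PySem.Set.ofList [zz])) z = pvReachB xs zz z := by
    rw [Bool.eq_iff_iff, PySem.Set.contains_iff, pvAltMem]
    constructor
    · rintro ⟨v, hv, hr⟩
      rw [PySem.Set.mem_ofList] at hv
      simp only [List.mem_singleton] at hv
      exact hv ▸ hr
    · intro hr
      exact ⟨zz, by rw [PySem.Set.mem_ofList]; simp, hr⟩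
  show (if PySem.Set.contains
      (xs.foldl
        (fun s x => PySem.Set.union (PySem.Set.ofList (s.map (fun v => v + x)))
                                    (PySem.Set.ofList (s.map (fun v => v - x))))
        (PySem.Set.ofList [zz])) z then (1 : Int) else 0) = _
  rw [this]

theorem pvF_succ (xs : List Int) (zz : Int) (i : Nat) (hi : i < xs.length) (k : Int) :
    pvReachB (xs.take (i + 1)) zz k = true ↔
      ∃ b, pvReachB (xs.take i) zz b = true ∧ (k = b + xs[i] ∨ k = b - xs[i]) := by
  rw [List.take_add_one, List.getElem?_eq_getElem hi]
  simp only [Option.toList_some]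
  exact pvReachB_snoc ..

theorem pvG_succ (xs : List Int) (z : Int) (j : Nat) (hj : j < xs.length) (k : Int) :
    pvReachB ((xs.drop j).reverse) z k = true ↔
      ∃ a, pvReachB ((xs.drop (j + 1)).reverse) z a = true ∧ (k = a + xs[j] ∨ k = a - xs[j]) := by
  rw [List.drop_eq_getElem_cons hj, List.reverse_cons]
  exact pvReachB_snoc ..

-- the main loop invariant proof
theorem pvCheckLoop_eq (xs : List Int) (z zz : Int) (n : Nat) (hn : n = xs.length) :
    ∀ (fuel i : Nat) (h : PySem.Dict Int (PySem.Dict Int Int)),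
      n = i + fuel →
      2 * i < n →
      (∀ j : Int, (h.get? j).isSome = true ↔
          ((0 ≤ j ∧ j ≤ (i : Int)) ∨ ((n : Int) - (i : Int) ≤ j ∧ j ≤ (n : Int)))) →
      (∀ j : Nat, j ≤ i → ∀ d, h.get? (j : Int) = some d →
          ∀ k, (d.contains k = true ↔ pvReachB (xs.take j) zz k = true)) →
      (∀ j : Nat, j ≤ i → ∀ d, h.get? ((n : Int) - (j : Int)) = some d →
          ∀ k, (d.contains k = true ↔ pvReachB ((xs.drop (n - j)).reverse) z k = true)) →
      pvCheckLoop xs n i fuel h = if pvReachB xs zz z then 1 else 0 := by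
  intro fuel
  induction fuel with
  | zero => intro i h hfi hi _ _ _; omega
  | succ fuel ih =>
    intro i h hfi hi inv1 inv2 inv3
    have hixs : i < xs.length := by omega
    have hx : PySem.List.pyGetD xs ((i : Nat) : Int) 0 = xs[i] := by
      rw [PySem.List.pyGetD_natCast, List.getD_eq_getElem]
    have h0s : (h.get? ((i : Nat) : Int)).isSome = true := (inv1 _).2 (Or.inl (by omega))
    obtain ⟨d0, hd0⟩ := Option.isSome_iff_exists.1 h0s
    have hd0c : ∀ k, d0.contains k = true ↔ pvReachB (xs.take i) zz k = true :=
      inv2 i le_rfl d0 hd0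
    have hgetD0 : h.getD ((i : Nat) : Int) PySem.Dict.empty = d0 := by
      rw [PySem.Dict.getD_eq_get?_getD, hd0, Option.getD_some]
    simp only [pvCheckLoop]
    cases hc : h.get? (((i : Nat) : Int) + 1) with
    | some d =>
      -- odd meet: the backward frontier already owns level i+1, so n = 2i+1
      have hn1 : n = 2 * i + 1 := by
        have h1 := (inv1 (((i : Nat) : Int) + 1)).1 (by rw [hc]; rfl)
        omega
      have hdc : ∀ k, d.contains k = true ↔ pvReachB ((xs.drop (i + 1)).reverse) z k = true := by
        have hkey : ((n : Nat) : Int) - ((i : Nat) : Int) = ((i : Nat) : Int) + 1 := by omega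
        have h' := inv3 i le_rfl d (by rw [hkey]; exact hc)
        have : n - i = i + 1 := by omega
        rwa [this] at h'
      rw [hgetD0, hx]
      apply pvCheckLevel_eq
      calc (∃ b, d0.contains b = true ∧
              (d.contains (b + xs[i]) = true ∨ d.contains (b - xs[i]) = true))
          ↔ ∃ b, pvReachB (xs.take i) zz b = true ∧
              (pvReachB ((xs.drop (i + 1)).reverse) z (b + xs[i]) = true ∨
               pvReachB ((xs.drop (i + 1)).reverse) z (b - xs[i]) = true) :=
            exists_congr fun b => and_congr (hd0c b) (or_congr (hdc _) (hdc _))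
        _ ↔ ∃ k, pvReachB (xs.take (i + 1)) zz k = true ∧
              pvReachB ((xs.drop (i + 1)).reverse) z k = true :=
            pvStep_iff _ (fun k => pvReachB ((xs.drop (i + 1)).reverse) z k = true) _ _
              (fun k => pvF_succ xs zz i hixs k)
        _ ↔ pvReachB xs zz z = true := pvMeet xs zz z (i + 1)
    | none =>
      have hn2 : 2 * i + 2 ≤ n := by
        have hno : ¬((0 ≤ ((i : Nat) : Int) + 1 ∧ ((i : Nat) : Int) + 1 ≤ ((i : Nat) : Int)) ∨
            (((n : Nat) : Int) - ((i : Nat) : Int) ≤ ((i : Nat) : Int) + 1 ∧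
             ((i : Nat) : Int) + 1 ≤ ((n : Nat) : Int))) := by
          intro hco
          have h1 := (inv1 (((i : Nat) : Int) + 1)).2 hco
          rw [hc] at h1
          simp at h1
        omega
      rw [hgetD0, hx]
      -- the freshly built forward level i+1
      have hB1 : ∀ k, (pvBuildLevel d0 xs[i]).contains k = true ↔
          pvReachB (xs.take (i + 1)) zz k = true := by
        intro k
        rw [pvBuildLevel_contains, pvF_succ xs zz i hixs k]
        exact exists_congr fun b => and_congr_left fun _ => hd0c b
      have hkey : ∀ j : Int,
          (h.insert (((i : Nat) : Int) + 1) (pvBuildLevel d0 xs[i])).get? j =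
            if j = ((i : Nat) : Int) + 1 then some (pvBuildLevel d0 xs[i]) else h.get? j :=
        fun j => PySem.Dict.get?_insert h (((i : Nat) : Int) + 1) j (pvBuildLevel d0 xs[i])
      cases hc2 : (h.insert (((i : Nat) : Int) + 1) (pvBuildLevel d0 xs[i])).get?
          (((n : Nat) : Int) - ((i : Nat) : Int) - 1) with
      | some d =>
        -- even meet: the forward level just built is level n-i-1, so n = 2i+2
        rw [hkey] at hc2
        split_ifs at hc2 with he
        · have hn4 : n = 2 * i + 2 := by omega
          have hd : d = pvBuildLevel d0 xs[i] := by
            first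
            | exact hc2.symm
            | exact (Option.some.inj hc2).symm
          subst hd
          have hi1xs : i + 1 < xs.length := by omega
          have hx' : PySem.List.pyGetD xs (((n : Nat) : Int) - ((i : Nat) : Int) - 1) 0 =
              xs[i + 1] := by
            have hcast : ((n : Nat) : Int) - ((i : Nat) : Int) - 1 = ((i + 1 : Nat) : Int) := by
              omega
            rw [hcast, PySem.List.pyGetD_natCast, List.getD_eq_getElem]
          have hGs : (h.get? (((n : Nat) : Int) - ((i : Nat) : Int))).isSome = true :=
            (inv1 _).2 (Or.inr (by omega))
          obtain ⟨dG, hdG⟩ := Option.isSome_iff_exists.1 hGs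
          have hdGc : ∀ k, dG.contains k = true ↔
              pvReachB ((xs.drop (i + 2)).reverse) z k = true := by
            have h' := inv3 i le_rfl dG hdG
            have : n - i = i + 2 := by omega
            rwa [this] at h'
          have hgd : (h.insert (((i : Nat) : Int) + 1) (pvBuildLevel d0 xs[i])).getD
              (((n : Nat) : Int) - ((i : Nat) : Int)) PySem.Dict.empty = dG := by
            rw [PySem.Dict.getD_eq_get?_getD, hkey, if_neg (by omega), hdG, Option.getD_some]
          rw [hgd, hx']
          apply pvCheckLevel_eq
          calc (∃ a, dG.contains a = true ∧
                  ((pvBuildLevel d0 xs[i]).contains (a + xs[i + 1]) = true ∨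
                   (pvBuildLevel d0 xs[i]).contains (a - xs[i + 1]) = true))
              ↔ ∃ a, pvReachB ((xs.drop (i + 2)).reverse) z a = true ∧
                  (pvReachB (xs.take (i + 1)) zz (a + xs[i + 1]) = true ∨
                   pvReachB (xs.take (i + 1)) zz (a - xs[i + 1]) = true) :=
                exists_congr fun a => and_congr (hdGc a) (or_congr (hB1 _) (hB1 _))
            _ ↔ ∃ k, pvReachB ((xs.drop (i + 1)).reverse) z k = true ∧
                  pvReachB (xs.take (i + 1)) zz k = true := by
                refine pvStep_iff _ (fun k => pvReachB (xs.take (i + 1)) zz k = true) _ _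
                  (fun k => ?_)
                have h' := pvG_succ xs z (i + 1) hi1xs k
                have : i + 1 + 1 = i + 2 := by omega
                rwa [this] at h'
            _ ↔ ∃ k, pvReachB (xs.take (i + 1)) zz k = true ∧
                  pvReachB ((xs.drop (i + 1)).reverse) z k = true :=
                exists_congr fun k => and_comm
            _ ↔ pvReachB xs zz z = true := pvMeet xs zz z (i + 1)
        · -- a backward level at n-i-1 in the old dict is impossible here
          exfalso
          have := (inv1 (((n : Nat) : Int) - ((i : Nat) : Int) - 1)).1 (by rw [hc2]; rfl)
          omega
      | none =>
        -- neither frontier has met: build the backward level n-i-1 and continue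
        have hn3 : 2 * i + 3 ≤ n := by
          rw [hkey] at hc2
          split_ifs at hc2 with he
          omega
        have hGs : (h.get? (((n : Nat) : Int) - ((i : Nat) : Int))).isSome = true :=
          (inv1 _).2 (Or.inr (by omega))
        obtain ⟨dG, hdG⟩ := Option.isSome_iff_exists.1 hGs
        have hdGc : ∀ k, dG.contains k = true ↔
            pvReachB ((xs.drop (n - i)).reverse) z k = true := inv3 i le_rfl dG hdG
        have hgd : (h.insert (((i : Nat) : Int) + 1) (pvBuildLevel d0 xs[i])).getD
            (((n : Nat) : Int) - ((i : Nat) : Int)) PySem.Dict.empty = dG := by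
          rw [PySem.Dict.getD_eq_get?_getD, hkey, if_neg (by omega), hdG, Option.getD_some]
        have hnixs : n - i - 1 < xs.length := by omega
        have hx' : PySem.List.pyGetD xs (((n : Nat) : Int) - ((i : Nat) : Int) - 1) 0 =
            xs[n - i - 1] := by
          have hcast : ((n : Nat) : Int) - ((i : Nat) : Int) - 1 = ((n - i - 1 : Nat) : Int) := by
            omega
          rw [hcast, PySem.List.pyGetD_natCast, List.getD_eq_getElem]
        have hB2 : ∀ k, (pvBuildLevel dG xs[n - i - 1]).contains k = true ↔
            pvReachB ((xs.drop (n - i - 1)).reverse) z k = true := by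
          intro k
          rw [pvBuildLevel_contains]
          have h' := pvG_succ xs z (n - i - 1) hnixs k
          rw [Nat.sub_add_cancel (by omega : 1 ≤ n - i)] at h'
          rw [h']
          exact exists_congr fun a => and_congr_left fun _ => hdGc a
        rw [hgd, hx']
        refine ih (i + 1) _ (by omega) (by omega) ?_ ?_ ?_
        · intro j
          rw [PySem.Dict.get?_insert, PySem.Dict.get?_insert]
          split_ifs with e1 e2
          · exact iff_of_true rfl (by omega)
          · exact iff_of_true rfl (by omega)
          · rw [inv1 j]
            omega
        · intro j hj d' hd' k
          rw [PySem.Dict.get?_insert, PySem.Dict.get?_insert] at hd'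
          split_ifs at hd' with e1 e2
          · exfalso; omega
          · have hji : j = i + 1 := by omega
            subst hji
            have hd'' : d' = pvBuildLevel d0 xs[i] := by
              first
              | exact hd'.symm
              | exact (Option.some.inj hd').symm
            subst hd''
            exact hB1 k
          · exact inv2 j (by omega) d' hd' k
        · intro j hj d' hd' k
          rw [PySem.Dict.get?_insert, PySem.Dict.get?_insert] at hd'
          split_ifs at hd' with e1 e2
          · have hji : j = i + 1 := by omega
            subst hji
            have hd'' : d' = pvBuildLevel dG xs[n - i - 1] := by
              first
              | exact hd'.symm
              | exact (Option.some.inj hd').symm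
            subst hd''
            have : n - (i + 1) = n - i - 1 := by omega
            rw [this]
            exact hB2 k
          · exfalso; omega
          · exact inv3 j (by omega) d' hd' k
    

theorem check_spec : Claim_equal_check := by
  intro z zz xs _
  unfold Spec_check
  rw [check_alt_eq]
  cases xs with
  | nil =>
    unfold check
    simp only [List.length_nil, pvReachB]
    by_cases hz : z = zz
    · subst hz
      simp
    · simp only [if_pos hz, beq_iff_eq]
      rw [if_neg (fun h : zz = z => hz h.symm), if_pos trivial]
  | cons a t =>
    unfold check
    simp only [List.length_cons]
    rw [if_neg (by simp)]
    apply pvCheckLoop_eq (a :: t) z zz (t.length + 1) (by simp) (t.length + 1) 0 _ (by omega)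
      (by omega)
    · intro j
      rw [PySem.Dict.get?_insert, PySem.Dict.get?_insert]
      split_ifs with e1 e2
      · exact iff_of_true rfl (by omega)
      · exact iff_of_true rfl (by omega)
      · rw [PySem.Dict.get?_empty]
        exact iff_of_false (by simp) (by omega)
    · intro j hj d hd k
      have hj0 : j = 0 := Nat.le_zero.1 hj
      subst hj0
      rw [PySem.Dict.get?_insert, PySem.Dict.get?_insert, if_neg (by omega),
        if_pos (by omega)] at hd
      have hd' : d = PySem.Dict.empty.insert zz (1 : Int) := by
        first
        | exact hd.symm
        | exact (Option.some.inj hd).symm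
      subst hd'
      rw [PySem.Dict.contains_insert, PySem.Dict.contains_empty]
      simp only [List.take_zero, pvReachB, Bool.or_false, beq_iff_eq]
      exact ⟨fun h => h.symm, fun h => h.symm⟩
    · intro j hj d hd k
      have hj0 : j = 0 := Nat.le_zero.1 hj
      subst hj0
      rw [PySem.Dict.get?_insert, if_pos (by omega)] at hd
      have hd' : d = PySem.Dict.empty.insert z (1 : Int) := by
        first
        | exact hd.symm
        | exact (Option.some.inj hd).symm
      subst hd'
      rw [PySem.Dict.contains_insert, PySem.Dict.contains_empty]
      have hdrop : (a :: t).drop (t.length + 1 - 0) = [] := by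
        rw [Nat.sub_zero]
        exact List.drop_length
      rw [hdrop]
      simp only [List.reverse_nil, pvReachB, Bool.or_false, beq_iff_eq]
      exact ⟨fun h => h.symm, fun h => h.symm⟩
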